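-- pv_equiv track=rewrite | github.com/rendanim/AppliedBio | Lab2/src/gc_counter.py | gc_count
-- ===== SOURCE A (Python) =====
-- def gc_count(line):
--     '''Count GC in each line sent by readfiles'''
--     gc=0
--     lc=0
--     for l in line:
--         if(l=='G'or l=='C'):
--             '''check G OR C'''
--             gc+=1
--         lc+=1
--         '''Return count for the line'''
--     return lc,gc
-- ===== SOURCE B (Python) =====
-- from collections import Counter
--
-- def gc_count(line):
--     '''Count GC in each line sent by readfiles'''
--     c = Counter(line)
--     return sum(c.values()), c['G'] + c['C']
-- ===== Notes on version B (the rewrite author's own statement) =====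
-- stated objective: idiomatic
-- what changed: B builds a full character histogram with collections.Counter in one pass and then reads the 'G' and 'C' entries and sums all values, instead of A's manual per-character conditional with two running counters.
import Mathlib
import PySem

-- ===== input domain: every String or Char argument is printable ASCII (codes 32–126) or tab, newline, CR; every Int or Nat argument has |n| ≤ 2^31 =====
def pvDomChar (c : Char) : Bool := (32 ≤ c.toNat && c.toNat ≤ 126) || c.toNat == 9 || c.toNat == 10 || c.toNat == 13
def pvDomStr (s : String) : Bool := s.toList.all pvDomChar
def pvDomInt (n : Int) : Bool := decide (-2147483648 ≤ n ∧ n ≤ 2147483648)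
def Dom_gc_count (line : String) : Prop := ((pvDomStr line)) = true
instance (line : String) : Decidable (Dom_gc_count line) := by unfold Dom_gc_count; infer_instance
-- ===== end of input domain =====

-- B replaces A's two running counters with a one-pass character histogram (Counter),
-- reading the 'G'/'C' entries and summing all values; same cost, more idiomatic.

-- ===== PORT A =====
-- for l in line: if l=='G' or l=='C': gc+=1; lc+=1 ; return lc, gc
def gc_count (line : String) : Int × Int :=
  let s := line.toList.foldl
    (fun (st : Int × Int) l =>
      let gc := if l = 'G' ∨ l = 'C' then st.1 + 1 else st.1
      (gc, st.2 + 1))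
    (0, 0)
  (s.2, s.1)

-- ===== PORT B =====
-- c = Counter(line); return sum(c.values()), c['G'] + c['C']
def gc_count_alt (line : String) : Int × Int :=
  let c : PySem.Dict Char Int := PySem.Dict.counter line.toList
  (c.values.sum, c.getD 'G' 0 + c.getD 'C' 0)

-- ===== PRECONDITION & SPEC =====
def Spec_gc_count (line : String) (out : Int × Int) : Prop := out = gc_count_alt line
instance (line : String) (out : Int × Int) : Decidable (Spec_gc_count line out) := by unfold Spec_gc_count; infer_instance

-- ===== CLAIM (what is proved, stated in full; the proofs are below) =====
def Claim_equal_gc_count : Prop := ∀ (line : String), Dom_gc_count line → Spec_gc_count line (gc_count line)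

-- ===== LEMMAS AND PROOFS =====

theorem gc_foldl_invariant (xs : List Char) (gc lc : Int) :
    xs.foldl (fun (st : Int × Int) l =>
      let g := if l = 'G' ∨ l = 'C' then st.1 + 1 else st.1
      (g, st.2 + 1)) (gc, lc)
    = (gc + xs.count 'G' + xs.count 'C', lc + xs.length) := by
  induction xs generalizing gc lc with
  | nil => simp
  | cons x xs ih =>
    simp only [List.foldl_cons, ih, List.count_cons, List.length_cons]
    by_cases hG : x = 'G' <;> by_cases hC : x = 'C' <;>
      simp [hG, hC, Prod.mk.injEq] <;> push_cast <;> omega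

theorem sum_values_counter (xs : List Char) :
    (PySem.Dict.counter xs).values.sum = (xs.length : Int) := by
  have hitems := PySem.Dict.items_counter (xs := xs)
  have hv : (PySem.Dict.counter xs).values
      = (PySem.Set.ofList xs).map (fun k => (xs.count k : Int)) := by
    simp only [PySem.Dict.values, hitems, List.map_map]
    rfl
  rw [hv]
  -- sum over the distinct elements of xs of their counts is the length
  have hperm : (PySem.Set.ofList xs : List Char).Perm xs.dedup := by
    apply List.perm_of_nodup_nodup_toFinset_eq (PySem.Set.nodup_ofList xs) xs.nodup_dedup
    ext a
    simp [List.mem_toFinset, PySem.Set.mem_ofList, List.mem_dedup]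
  have := (hperm.map (fun k => (xs.count k : Int))).sum_eq
  rw [this]
  have hnat : (xs.dedup.map fun k => xs.count k).sum = xs.length :=
    List.sum_map_count_dedup_eq_length xs
  calc (xs.dedup.map fun k => (xs.count k : Int)).sum
      = ((xs.dedup.map fun k => xs.count k).map (Nat.cast : ℕ → ℤ)).sum := by
        rw [List.map_map]; rfl
    _ = (((xs.dedup.map fun k => xs.count k).sum : ℕ) : ℤ) := (Nat.cast_list_sum _).symm
    _ = (xs.length : ℤ) := by rw [hnat]

-- ===== VERDICT (by name: the statement is the Claim_ definition above) =====
theorem gc_count_spec : Claim_equal_gc_count := by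
  intro line _
  unfold Spec_gc_count gc_count gc_count_alt
  simp only [gc_foldl_invariant, sum_values_counter, PySem.Dict.getD_counter, Prod.mk.injEq]
  constructor <;> ring
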